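-- pv_equiv track=rewrite | github.com/thuva4/Algorithms | algorithms/strings/lz77-compression/python/lz77_compression.py | lz77_compression
-- ===== SOURCE A (Python) =====
-- def lz77_compression(arr):
--     """
--     Simplified LZ77: count back-references in a sliding window.
--     A back-reference is found when at position i, there exists a match of
--     length >= 2 starting at some earlier position in the window.
--
--     Returns: number of back-references found
--     """
--     n = len(arr)
--     window_size = 256
--     count = 0
--     i = 0
--
--     while i < n:
--         best_len = 0
--         start = max(0, i - window_size)
--
--         for j in range(start, i):
--             length = 0
--             while i + length < n and length < (i - j) and arr[j + length] == arr[i + length]: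
--                 length += 1
--             # Also allow repeating copy (overlapping)
--             if length == i - j:
--                 while i + length < n and arr[j + (length % (i - j))] == arr[i + length]:
--                     length += 1
--             if length > best_len:
--                 best_len = length
--
--         if best_len >= 2:
--             count += 1
--             i += best_len
--         else:
--             i += 1
--
--     return count
-- ===== SOURCE B (Python) =====
-- def lz77_compression(arr):
--     """
--     Simplified LZ77: count back-references in a sliding window.
--
--     Different algorithm: instead of scanning for matches at each position,
--     precompute by backward dynamic programming, for every copy distance
--     p = 1..256, the table ext[p-1] where ext[p-1][n - t] is the length of the
--     longest run starting at t with arr[t+k] == arr[t+k-p] for all k.  That run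
--     length is exactly the (possibly overlapping) match length of a copy from
--     start t-p, so the greedy pass just reads 256 table entries per step.
--     """
--     n = len(arr)
--     W = 256
--     ext = []
--     for p in range(1, W + 1):
--         # row[d] = run length at position t = n - d; built from the right end
--         row = [0]
--         for t in range(n - 1, p - 1, -1):
--             row.append(row[-1] + 1 if arr[t] == arr[t - p] else 0)
--         ext.append(row)
--
--     count = 0
--     i = 0
--     while i < n:
--         best = 0
--         for p in range(1, min(i, W) + 1):
--             v = ext[p - 1][n - i]
--             if v > best:
--                 best = v
--         if best >= 2:
--             count += 1
--             i += best
--         else: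
--             i += 1
--     return count
-- ===== Notes on version B (the rewrite author's own statement) =====
-- stated objective: alternative
-- what changed: B replaces A's per-position nested match scanning (a bounded literal-match loop plus a separate overlapping-copy loop for each window start) with backward dynamic programming: it precomputes, for every copy distance p = 1..256, a run-length table ext[p-1][n-t] = longest run with arr[t+k] == arr[t+k-p], which equals the overlapping match length from start t-p, so the greedy pass just reads 256 precomputed entries per step.
import Mathlib
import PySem

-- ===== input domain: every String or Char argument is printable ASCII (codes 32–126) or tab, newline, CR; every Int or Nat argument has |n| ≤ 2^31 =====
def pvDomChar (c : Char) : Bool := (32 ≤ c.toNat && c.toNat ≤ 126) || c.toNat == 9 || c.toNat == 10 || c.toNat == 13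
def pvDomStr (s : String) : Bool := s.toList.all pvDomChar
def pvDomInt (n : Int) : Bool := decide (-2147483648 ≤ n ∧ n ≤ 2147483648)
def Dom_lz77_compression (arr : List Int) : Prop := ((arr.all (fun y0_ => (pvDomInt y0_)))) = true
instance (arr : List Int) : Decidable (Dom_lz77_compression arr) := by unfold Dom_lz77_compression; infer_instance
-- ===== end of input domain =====

-- B replaces A's per-position nested match scanning with backward-DP run-length tables
-- (one per copy distance p = 1..256) read by the greedy pass (objective: alternative).

-- shared indexing helper: every access in both programs is at an in-range nonnegative index
-- (guarded by i+length < n, p ≤ i < n and row lengths), so the default is never used; exact there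
def pvGet (arr : List Int) (k : Int) : Int := (PySem.List.pyGet? arr k).getD 0

-- ===== PORT A =====
-- first inner while: literal match, bounded by length < i - j
def lzA_inner1 (arr : List Int) (n i j : Int) : Nat → Int → Int
  | 0, length => length
  | fuel+1, length =>
    if i + length < n ∧ length < i - j ∧ pvGet arr (j + length) = pvGet arr (i + length) then
      lzA_inner1 arr n i j fuel (length + 1)
    else length

-- second inner while: overlapping (repeating-copy) extension with modular index
def lzA_inner2 (arr : List Int) (n i j : Int) : Nat → Int → Int
  | 0, length => length
  | fuel+1, length =>
    if i + length < n ∧ pvGet arr (j + PySem.Int.mod length (i - j)) = pvGet arr (i + length) then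
      lzA_inner2 arr n i j fuel (length + 1)
    else length

-- body of 'for j in range(start, i)' computing the match length at j
def lzA_match (arr : List Int) (n i j : Int) : Int :=
  let length := lzA_inner1 arr n i j (n - i).toNat 0
  if length = i - j then lzA_inner2 arr n i j (n - i).toNat length else length

-- the for-loop over start positions, accumulating best_len
def lzA_best (arr : List Int) (n i : Int) : Int :=
  (PySem.List.pyRange (max 0 (i - 256)) i 1).foldl
    (fun best_len j =>
      if lzA_match arr n i j > best_len then lzA_match arr n i j else best_len) 0

-- outer while loop (fuel = n: i strictly increases each iteration)
def lzA_outer (arr : List Int) (n : Int) : Nat → Int → Int → Int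
  | 0, _, count => count
  | fuel+1, i, count =>
    if i < n then
      let best_len := lzA_best arr n i
      if best_len ≥ 2 then lzA_outer arr n fuel (i + best_len) (count + 1)
      else lzA_outer arr n fuel (i + 1) count
    else count

def lz77_compression (arr : List Int) : Int :=
  lzA_outer arr (arr.length : Int) arr.length 0 0

-- ===== PORT B =====
-- inner 'for t in range(n-1, p-1, -1)' building one run-length row back-to-front
-- (row[-1] read with pvGet at index -1: row is never empty, starts as [0])
def lzB_row (arr : List Int) (n p : Int) : List Int :=
  (PySem.List.pyRange (n - 1) (p - 1) (-1)).foldl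
    (fun row t =>
      row ++ [if pvGet arr t = pvGet arr (t - p) then pvGet row (-1) + 1 else 0]) [0]

-- 'for p in range(1, W+1): ... ext.append(row)'
def lzB_ext (arr : List Int) (n : Int) : List (List Int) :=
  (PySem.List.pyRange 1 257 1).foldl (fun ext p => ext ++ [lzB_row arr n p]) []

-- v = ext[p-1][n-i]
def pvGet2 (ext : List (List Int)) (a b : Int) : Int :=
  pvGet ((PySem.List.pyGet? ext a).getD []) b

-- 'for p in range(1, min(i, W)+1)' reading the precomputed tables
def lzB_best (arr : List Int) (n i : Int) (ext : List (List Int)) : Int :=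
  (PySem.List.pyRange 1 (min i 256 + 1) 1).foldl
    (fun best p =>
      if pvGet2 ext (p - 1) (n - i) > best then pvGet2 ext (p - 1) (n - i) else best) 0

-- outer while loop, same greedy advance as the source
def lzB_outer (arr : List Int) (n : Int) (ext : List (List Int)) : Nat → Int → Int → Int
  | 0, _, count => count
  | fuel+1, i, count =>
    if i < n then
      let best := lzB_best arr n i ext
      if best ≥ 2 then lzB_outer arr n ext fuel (i + best) (count + 1)
      else lzB_outer arr n ext fuel (i + 1) count
    else count

def lz77_compression_alt (arr : List Int) : Int :=
  lzB_outer arr (arr.length : Int) (lzB_ext arr (arr.length : Int)) arr.length 0 0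

-- ===== PRECONDITION & SPEC =====
def Spec_lz77_compression (arr : List Int) (out : Int) : Prop := out = lz77_compression_alt arr
instance (arr : List Int) (out : Int) : Decidable (Spec_lz77_compression arr out) := by unfold Spec_lz77_compression; infer_instance

-- ===== CLAIM (what is proved, stated in full; the proofs are below) =====
def Claim_equal_lz77_compression : Prop := ∀ (arr : List Int), Dom_lz77_compression arr → Spec_lz77_compression arr (lz77_compression arr)

-- ===== LEMMAS AND PROOFS =====

-- specification of one run-length table entry: Rlen arr n p d = longest run starting at
-- position t = n - d with arr[t+k] = arr[t+k-p] for all k (bounded by the array end)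
def Rlen (arr : List Int) (n p : Int) : Nat → Int
  | 0 => 0
  | d+1 => if pvGet arr (n - (d+1 : Nat)) = pvGet arr (n - (d+1 : Nat) - p) then Rlen arr n p d + 1 else 0

-- the unified modular-index loop, a proof-only stepping stone between A's two phases and Rlen
def lzU_loop (arr : List Int) (n i j p : Int) : Nat → Int → Int
  | 0, L => L
  | fuel+1, L =>
    if i + L < n ∧ pvGet arr (j + PySem.Int.mod L p) = pvGet arr (i + L) then
      lzU_loop arr n i j p fuel (L + 1)
    else L

-- Python's L % p keeps L unchanged while 0 ≤ L < p
theorem pv_mod_small (L p : Int) (h0 : 0 ≤ L) (h1 : L < p) : PySem.Int.mod L p = L := by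
  rw [PySem.Int.mod_eq_emod_of_pos (by omega)]
  exact Int.emod_eq_of_lt h0 h1

-- A's overlapping loop is the unified loop once p = i - j is substituted
theorem inner2_eq_loop (arr : List Int) (n i j : Int) :
    ∀ (fuel : Nat) (L : Int), lzA_inner2 arr n i j fuel L = lzU_loop arr n i j (i - j) fuel L := by
  intro fuel
  induction fuel with
  | zero => intro L; rfl
  | succ f ih => intro L; simp only [lzA_inner2, lzU_loop, ih]

theorem inner1_ge (arr : List Int) (n i j : Int) :
    ∀ (fuel : Nat) (L : Int), L ≤ lzA_inner1 arr n i j fuel L := by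
  intro fuel
  induction fuel with
  | zero => intro L; simp [lzA_inner1]
  | succ f ih =>
    intro L
    simp only [lzA_inner1]
    split
    · exact le_trans (by omega) (ih (L + 1))
    · exact le_refl L

-- once length has reached i - j the first loop stops immediately
theorem inner1_stop (arr : List Int) (n i j : Int) (fuel : Nat) (L : Int) (h : ¬ L < i - j) :
    lzA_inner1 arr n i j fuel L = L := by
  cases fuel with
  | zero => rfl
  | succ f => simp only [lzA_inner1]; rw [if_neg]; tauto

-- the overlapping loop's value does not depend on the fuel once it is sufficient
theorem inner2_fuel (arr : List Int) (n i j : Int) :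
    ∀ (f1 f2 : Nat) (L : Int), (n - i - L).toNat ≤ f1 → (n - i - L).toNat ≤ f2 →
      lzA_inner2 arr n i j f1 L = lzA_inner2 arr n i j f2 L := by
  intro f1
  induction f1 with
  | zero =>
    intro f2 L h1 _
    have hn : ¬ i + L < n := by omega
    cases f2 with
    | zero => rfl
    | succ f => simp only [lzA_inner2]; rw [if_neg]; tauto
  | succ f ih =>
    intro f2 L h1 h2
    by_cases hg : i + L < n ∧ pvGet arr (j + PySem.Int.mod L (i - j)) = pvGet arr (i + L)
    · cases f2 with
      | zero => omega
      | succ f2' =>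
        simp only [lzA_inner2, if_pos hg]
        exact ih f2' (L + 1) (by omega) (by omega)
    · cases f2 with
      | zero => simp only [lzA_inner2]; rw [if_neg hg]
      | succ f2' => simp only [lzA_inner2]; rw [if_neg hg, if_neg hg]

-- A's two-phase computation equals the unified loop
theorem match_loop_eq (arr : List Int) (n i j : Int) :
    ∀ (fuel : Nat) (L : Int), 0 ≤ L → L < i - j → (n - i - L).toNat ≤ fuel →
      (if lzA_inner1 arr n i j fuel L = i - j then lzA_inner2 arr n i j fuel (lzA_inner1 arr n i j fuel L)
       else lzA_inner1 arr n i j fuel L) = lzU_loop arr n i j (i - j) fuel L := by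
  intro fuel
  induction fuel with
  | zero =>
    intro L h0 hL _
    simp only [lzA_inner1, lzU_loop]
    rw [if_neg (by omega)]
  | succ f ih =>
    intro L h0 hL hfuel
    have hmod : PySem.Int.mod L (i - j) = L := pv_mod_small L (i - j) h0 hL
    by_cases hg : i + L < n ∧ pvGet arr (j + L) = pvGet arr (i + L)
    · have hg1 : i + L < n ∧ L < i - j ∧ pvGet arr (j + L) = pvGet arr (i + L) := ⟨hg.1, hL, hg.2⟩
      have hgB : i + L < n ∧ pvGet arr (j + PySem.Int.mod L (i - j)) = pvGet arr (i + L) := by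
        rw [hmod]; exact hg
      rw [show lzA_inner1 arr n i j (f+1) L = lzA_inner1 arr n i j f (L+1) from by
            simp only [lzA_inner1]; rw [if_pos hg1]]
      rw [show lzU_loop arr n i j (i - j) (f+1) L = lzU_loop arr n i j (i - j) f (L+1) from by
            simp only [lzU_loop]; rw [if_pos hgB]]
      by_cases hL1 : L + 1 < i - j
      · rw [← ih (L + 1) (by omega) hL1 (by omega)]
        have hr := inner1_ge arr n i j f (L + 1)
        split
        · exact inner2_fuel arr n i j (f + 1) f _ (by omega) (by omega)
        · rfl
      · have hLp : L + 1 = i - j := by omega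
        rw [inner1_stop arr n i j f (L + 1) (by omega), if_pos hLp,
            inner2_fuel arr n i j (f + 1) f (L + 1) (by omega) (by omega),
            inner2_eq_loop arr n i j f (L + 1)]
    · have hg1 : ¬ (i + L < n ∧ L < i - j ∧ pvGet arr (j + L) = pvGet arr (i + L)) := by tauto
      have hgB : ¬ (i + L < n ∧ pvGet arr (j + PySem.Int.mod L (i - j)) = pvGet arr (i + L)) := by
        rw [hmod]; exact hg
      simp only [lzA_inner1, lzU_loop]
      rw [if_neg hg1, if_neg hgB, if_neg (by omega)]

-- the unified loop computes L + (run length of arr[t] = arr[t-p] from t = i + L),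
-- given the history invariant that all positions below L already matched
theorem U_eq_Rlen (arr : List Int) (n i p : Int) (hp : 0 < p) :
    ∀ (fuel : Nat) (L : Int), 0 ≤ L →
      (∀ k : Int, 0 ≤ k → k < L → pvGet arr ((i - p) + PySem.Int.mod k p) = pvGet arr (i + k)) →
      (n - i - L).toNat ≤ fuel →
      lzU_loop arr n i (i - p) p fuel L = L + Rlen arr n p (n - (i + L)).toNat := by
  intro fuel
  induction fuel with
  | zero =>
    intro L h0 _ hf
    have : (n - (i + L)).toNat = 0 := by omega
    rw [this]
    simp [lzU_loop, Rlen]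
  | succ f ih =>
    intro L h0 hinv hf
    by_cases hin : i + L < n
    · -- key: the modular read equals the self-referential read arr[i+L-p]
      have hkey : pvGet arr ((i - p) + PySem.Int.mod L p) = pvGet arr (i + L - p) := by
        by_cases hLp : L < p
        · rw [pv_mod_small L p h0 hLp]; ring_nf
        · have hm : PySem.Int.mod L p = PySem.Int.mod (L - p) p := by
            rw [PySem.Int.mod_eq_emod_of_pos hp, PySem.Int.mod_eq_emod_of_pos hp]
            rw [← Int.sub_emod_right L p]
          rw [hm, hinv (L - p) (by omega) (by omega)]
          ring_nf
      obtain ⟨d, hd⟩ : ∃ d : Nat, (n - (i + L)).toNat = d + 1 := ⟨(n - (i + L)).toNat - 1, by omega⟩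
      have hdI : ((d : Int) + 1) = n - (i + L) := by omega
      have ht : n - ((d+1 : Nat) : Int) = i + L := by push_cast; omega
      by_cases hc : pvGet arr ((i - p) + PySem.Int.mod L p) = pvGet arr (i + L)
      · have step : lzU_loop arr n i (i - p) p (f+1) L = lzU_loop arr n i (i - p) p f (L+1) := by
          simp only [lzU_loop]; rw [if_pos ⟨hin, hc⟩]
        rw [step, ih (L+1) (by omega)
              (by intro k hk0 hk1
                  by_cases hkL : k < L
                  · exact hinv k hk0 hkL
                  · have : k = L := by omega
                    rw [this]; exact hc)
              (by omega)]
        have h2 : (n - (i + (L+1))).toNat = d := by omega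
        rw [h2, hd]
        have hR : Rlen arr n p (d+1) = Rlen arr n p d + 1 := by
          simp only [Rlen]
          rw [if_pos]
          rw [ht]
          rw [← hkey]; rw [hc]
        rw [hR]; ring
      · have step : lzU_loop arr n i (i - p) p (f+1) L = L := by
          simp only [lzU_loop]; rw [if_neg (by tauto)]
        rw [step, hd]
        have hR : Rlen arr n p (d+1) = 0 := by
          simp only [Rlen]
          rw [if_neg]
          rw [ht]
          intro h; exact hc (by rw [hkey]; exact h.symm ▸ h)
        rw [hR]; ring
    · have : (n - (i + L)).toNat = 0 := by omega
      rw [this]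
      simp only [lzU_loop, Rlen]
      rw [if_neg (by tauto)]
      ring

-- A's match length at start position j equals the run-length table entry at distance p = i - j
theorem match_eq_Rlen (arr : List Int) (n i j : Int) (hj : j < i) :
    lzA_match arr n i j = Rlen arr n (i - j) (n - i).toNat := by
  unfold lzA_match
  rw [match_loop_eq arr n i j (n - i).toNat 0 le_rfl (by omega) (by omega)]
  have := U_eq_Rlen arr n i (i - j) (by omega) (n - i).toNat 0 le_rfl
    (by intro k hk0 hk1; omega) (by omega)
  rw [show i - (i - j) = j by ring] at this
  rw [this]
  simp

-- ROW: the fold building one row produces exactly the table of Rlen values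
theorem row_fold (arr : List Int) (n p : Int) :
    ∀ (d : Nat) (acc : List Int), p - 1 + d ≤ n - 1 →
      acc = (List.range ((n - 1 - (p - 1 + d)).toNat + 1)).map (Rlen arr n p) →
      (PySem.List.pyRange (p - 1 + d) (p - 1) (-1)).foldl
        (fun row t =>
          row ++ [if pvGet arr t = pvGet arr (t - p) then pvGet row (-1) + 1 else 0]) acc
      = (List.range ((n - p).toNat + 1)).map (Rlen arr n p) := by
  intro d
  induction d with
  | zero =>
    intro acc _ hacc
    rw [PySem.List.pyRange_neg_one_eq_nil (by omega)]
    simp only [List.foldl_nil]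
    rw [hacc]
    congr 2
    omega
  | succ d ih =>
    intro acc hle hacc
    have hcons : PySem.List.pyRange (p - 1 + ((d + 1 : Nat) : Int)) (p - 1) (-1)
        = (p - 1 + ((d + 1 : Nat) : Int)) :: PySem.List.pyRange (p - 1 + ((d + 1 : Nat) : Int) - 1) (p - 1) (-1) :=
      PySem.List.pyRange_neg_one_cons (by omega)
    rw [hcons, List.foldl_cons,
      show p - 1 + ((d + 1 : Nat) : Int) - 1 = p - 1 + ((d : Nat) : Int) by push_cast; ring]
    apply ih _ (by omega)
    rw [hacc]
    have hlast : pvGet ((List.range ((n - 1 - (p - 1 + ((d + 1 : Nat) : Int))).toNat + 1)).map (Rlen arr n p)) (-1)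
        = Rlen arr n p (n - 1 - (p - 1 + ((d + 1 : Nat) : Int))).toNat := by
      rw [List.range_succ, List.map_append, List.map_singleton]
      unfold pvGet
      rw [PySem.List.pyGet?_neg_one_append_singleton]
      rfl
    rw [hlast]
    have hR : Rlen arr n p ((n - 1 - (p - 1 + ((d + 1 : Nat) : Int))).toNat + 1)
        = if pvGet arr (p - 1 + ((d + 1 : Nat) : Int)) = pvGet arr (p - 1 + ((d + 1 : Nat) : Int) - p)
          then Rlen arr n p (n - 1 - (p - 1 + ((d + 1 : Nat) : Int))).toNat + 1 else 0 := by
      simp only [Rlen]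
      rw [show n - (((n - 1 - (p - 1 + ((d + 1 : Nat) : Int))).toNat + 1 : Nat) : Int)
          = p - 1 + ((d + 1 : Nat) : Int) by omega]
    rw [show (n - 1 - (p - 1 + ((d : Nat) : Int))).toNat
        = ((n - 1 - (p - 1 + ((d + 1 : Nat) : Int))).toNat + 1) by omega,
      List.range_succ (n := (n - 1 - (p - 1 + ((d + 1 : Nat) : Int))).toNat + 1),
      List.map_append, List.map_singleton, hR]

theorem row_spec (arr : List Int) (n p : Int) :
    lzB_row arr n p = (List.range ((n - p).toNat + 1)).map (Rlen arr n p) := by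
  unfold lzB_row
  by_cases hpn : p ≤ n
  · have : n - 1 = p - 1 + ((n - p).toNat : Int) := by omega
    rw [this]
    exact row_fold arr n p (n - p).toNat [0]
      (by omega)
      (by rw [show (n - 1 - (p - 1 + ((n - p).toNat : Int))).toNat = 0 by omega]; rfl)
  · rw [PySem.List.pyRange_neg_one_eq_nil (by omega)]
    rw [show (n - p).toNat = 0 by omega]
    rfl

-- EXT: the ext fold is the map of rows over p = 1..256
theorem ext_spec (arr : List Int) (n : Int) :
    lzB_ext arr n = (PySem.List.pyRange 1 257 1).map (lzB_row arr n) := by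
  unfold lzB_ext
  rw [PySem.List.foldl_append_singleton_eq_map]
  rfl

-- the table lookup B performs equals A's match length at start position i - p
theorem lookup_eq (arr : List Int) (n i p : Int) (hp1 : 1 ≤ p) (hp2 : p ≤ 256)
    (hpi : p ≤ i) (hi : i < n) :
    pvGet2 (lzB_ext arr n) (p - 1) (n - i) = Rlen arr n p (n - i).toNat := by
  unfold pvGet2
  rw [ext_spec]
  have hidx : PySem.List.pyGet? ((PySem.List.pyRange 1 257 1).map (lzB_row arr n)) (p - 1)
      = some (lzB_row arr n p) := by
    rw [PySem.List.pyGet?_of_nonneg _ (by omega : (0:Int) ≤ p - 1)]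
    rw [List.getElem?_map, PySem.List.getElem?_pyRange_one,
      if_pos (by omega : (p - 1).toNat < ((257 : Int) - 1).toNat)]
    simp only [Option.map_some]
    congr 2
    omega
  rw [hidx]
  simp only [Option.getD_some]
  rw [row_spec arr n p]
  unfold pvGet
  rw [PySem.List.pyGet?_of_nonneg _ (by omega : (0:Int) ≤ n - i)]
  rw [List.getElem?_map]
  rw [List.getElem?_range (by omega)]
  simp

-- running maximum as a fold of max over the mapped list
theorem foldl_if_max (m : Int → Int) (l : List Int) (b : Int) :
    l.foldl (fun best x => if m x > best then m x else best) b = (l.map m).foldl max b := by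
  rw [List.foldl_map]
  apply PySem.List.foldl_congr_mem
  intro acc x _
  by_cases h : m x > acc
  · rw [if_pos h, max_eq_right h.le]
  · rw [if_neg h, max_eq_left (by omega)]

theorem foldl_max_out : ∀ (l : List Int) (b a : Int), l.foldl max (max b a) = max (l.foldl max b) a := by
  intro l
  induction l with
  | nil => intro b a; rfl
  | cons x l ih =>
    intro b a
    simp only [List.foldl_cons]
    rw [max_right_comm b a x, ih (max b x) a]

-- folding max is insensitive to reversing the list
theorem foldl_max_reverse : ∀ (l : List Int) (b : Int), l.reverse.foldl max b = l.foldl max b := by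
  intro l
  induction l with
  | nil => intro b; rfl
  | cons x l ih =>
    intro b
    simp only [List.reverse_cons, List.foldl_append, List.foldl_cons, List.foldl_nil,
      List.foldl_cons] at *
    rw [ih b, ← foldl_max_out l b x, max_comm b x]

-- A's list of match lengths (by start position) is the reverse of B's (by distance)
theorem maps_reverse (arr : List Int) (n i : Int) (h0 : 0 ≤ i) (hi : i < n) :
    (PySem.List.pyRange (max 0 (i - 256)) i 1).map (fun j => lzA_match arr n i j) =
      ((PySem.List.pyRange 1 (min i 256 + 1) 1).map
        (fun p => pvGet2 (lzB_ext arr n) (p - 1) (n - i))).reverse := by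
  apply List.ext_getElem
  · simp only [List.length_map, List.length_reverse, PySem.List.length_pyRange_one]
    omega
  · intro k h1 h2
    simp only [List.length_map, PySem.List.length_pyRange_one] at h1
    simp only [List.getElem_map, List.getElem_reverse, List.length_map,
      PySem.List.length_pyRange_one, PySem.List.getElem_pyRange_one]
    set j : Int := max 0 (i - 256) + k with hj
    have hjlt : j < i := by omega
    set p : Int := 1 + ((min i 256 + 1 - 1).toNat - 1 - k : Nat) with hp
    have hpj : p = i - j := by push_cast [hp, hj]; omega
    rw [lookup_eq arr n i p (by push_cast [hp]; omega) (by push_cast [hp]; omega)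
          (by omega) hi]
    rw [match_eq_Rlen arr n i j hjlt, hpj]

theorem best_eq (arr : List Int) (n i : Int) (h0 : 0 ≤ i) (hi : i < n) :
    lzA_best arr n i = lzB_best arr n i (lzB_ext arr n) := by
  calc lzA_best arr n i
      = ((PySem.List.pyRange (max 0 (i - 256)) i 1).map (fun j => lzA_match arr n i j)).foldl max 0 :=
        foldl_if_max _ _ 0
    _ = (((PySem.List.pyRange 1 (min i 256 + 1) 1).map
          (fun p => pvGet2 (lzB_ext arr n) (p - 1) (n - i))).reverse).foldl max 0 := by
        rw [maps_reverse arr n i h0 hi]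
    _ = ((PySem.List.pyRange 1 (min i 256 + 1) 1).map
          (fun p => pvGet2 (lzB_ext arr n) (p - 1) (n - i))).foldl max 0 :=
        foldl_max_reverse _ 0
    _ = lzB_best arr n i (lzB_ext arr n) := (foldl_if_max _ _ 0).symm

theorem outer_eq (arr : List Int) (n : Int) :
    ∀ (fuel : Nat) (i count : Int), 0 ≤ i →
      lzA_outer arr n fuel i count = lzB_outer arr n (lzB_ext arr n) fuel i count := by
  intro fuel
  induction fuel with
  | zero => intro i count _; rfl
  | succ f ih =>
    intro i count h0
    by_cases hi : i < n
    · simp only [lzA_outer, lzB_outer, if_pos hi]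
      rw [best_eq arr n i h0 hi]
      set b : Int := lzB_best arr n i (lzB_ext arr n) with hb
      by_cases h2 : b ≥ 2
      · rw [if_pos h2, if_pos h2, ih (i + b) (count + 1) (by omega)]
      · rw [if_neg h2, if_neg h2, ih (i + 1) count (by omega)]
    · simp only [lzA_outer, lzB_outer, if_neg hi]

-- ===== VERDICT (by name: the statement is the Claim_ definition above) =====
theorem lz77_compression_spec : Claim_equal_lz77_compression := by
  intro arr _
  unfold Spec_lz77_compression lz77_compression lz77_compression_alt
  exact outer_eq arr (arr.length : Int) arr.length 0 0 le_rfl
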